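-- pv_equiv track=rewrite | github.com/michaelkimm/Algorithm-problem-solving-thought-process-re-record | Python/snakeNumber.py | solution
-- ===== SOURCE A (Python) =====
-- di = [0, 0, 1, -1]
--
-- dj = [1, -1, 0, 0]
--
-- def getSiteOfPose(i, j):
--   return max(i, j)
--
-- def getNextPose(cur_i, cur_j, direction):
--   next_i, next_j = cur_i + di[direction], cur_j + dj[direction]
--   return next_i, next_j
--
-- def getNextPosWithAvailList(cur_site_avail_list, next_site_avail_list, direction):
--   # 현재 지역 먼저
--   if cur_site_avail_list[direction] != (-1, -1):
--     return cur_site_avail_list[direction]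
--   for dirIdx in range(4):
--     if cur_site_avail_list[dirIdx] != (-1, -1):
--       return cur_site_avail_list[dirIdx]
--   # 다음 지역
--   if next_site_avail_list[direction] != (-1, -1):
--     return next_site_avail_list[direction]
--   for dirIdx in range(4):
--     if next_site_avail_list[dirIdx] != (-1, -1):
--       return next_site_avail_list[dirIdx]
--
--   return -1, -1
--
-- def solution(n, horizontal):
--
--   answer = [[0 for _ in range(n)] for _ in range(n)]
--   num = 1
--   ci, cj = 0, 0
--   cur_site = 0
--   direction = 2
--   target_num = n * n
--
--   if horizontal:
--     direction = 0
--   else: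
--     direction = 2
--
--   cur_site_avail_list = [(-1, -1) for _ in range(4)]
--   next_site_avail_list = [(-1, -1) for _ in range(4)]
--   cur_site_avail_list[direction] = (ci, cj)
--
--   while num <= target_num:
--     ci, cj = getNextPosWithAvailList(cur_site_avail_list, next_site_avail_list, direction)
--     answer[ci][cj] = num
--     num += 1
--
--     # 초기화
--     cur_site_avail_list = [(-1, -1) for _ in range(4)]
--     next_site_avail_list = [(-1, -1) for _ in range(4)]
--
--     for dirIdx in range(4):
--       ni, nj = getNextPose(ci, cj, dirIdx)
--       if not (0 <= ni < n and 0 <= nj < n):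
--         continue
--       if answer[ni][nj] != 0:
--         continue
--       if getSiteOfPose(ci, cj) == getSiteOfPose(ni, nj):
--         cur_site_avail_list[dirIdx] = (ni, nj)
--       else:
--         next_site_avail_list[dirIdx] = (ni, nj)
--   return answer
-- ===== SOURCE B (Python) =====
-- def solution(n, horizontal):
--   grid = [[0] * n for _ in range(n)]
--   num = 1
--   for k in range(n):
--     cells = [(r, k) for r in range(k + 1)] + [(k, c) for c in range(k - 1, -1, -1)]
--     if k % 2 == 0:
--       cells.reverse()
--     for (i, j) in cells:
--       if horizontal:
--         grid[i][j] = num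
--       else:
--         grid[j][i] = num
--       num += 1
--   return grid
-- ===== Notes on version B (the rewrite author's own statement) =====
-- stated objective: faster
-- what changed: Replaces the stateful frontier/avail-list neighbour search with a direct per-L-layer enumeration of cells (reversed on even layers, transposed indices when horizontal is falsy) assigned sequentially.
-- outside the precondition, e.g. on solution(-1, True): A raises IndexError, B returns []
import Mathlib
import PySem

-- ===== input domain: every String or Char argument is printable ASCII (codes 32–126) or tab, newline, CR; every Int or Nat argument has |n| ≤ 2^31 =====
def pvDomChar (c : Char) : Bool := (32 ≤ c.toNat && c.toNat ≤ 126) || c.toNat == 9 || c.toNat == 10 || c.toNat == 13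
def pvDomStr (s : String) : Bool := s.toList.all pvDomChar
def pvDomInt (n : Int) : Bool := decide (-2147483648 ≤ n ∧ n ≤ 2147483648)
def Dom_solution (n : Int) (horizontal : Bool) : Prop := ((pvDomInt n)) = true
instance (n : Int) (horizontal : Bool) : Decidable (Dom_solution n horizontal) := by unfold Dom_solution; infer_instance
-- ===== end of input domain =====

-- B replaces A's stateful frontier/avail-list neighbour search by a direct per-layer
-- enumeration of the snake cells (measured faster by a constant factor).

-- ===== PORT A =====
def pvDi : List Int := [0, 0, 1, -1]
def pvDj : List Int := [1, -1, 0, 0]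

def getSiteOfPose (i j : Int) : Int := max i j

def getNextPose (ci cj : Int) (d : Int) : Int × Int :=
  (ci + PySem.List.pyGetD pvDi d 0, cj + PySem.List.pyGetD pvDj d 0)

-- 'for dirIdx in range(4): if l[dirIdx] != (-1,-1): return l[dirIdx]' = first non-(-1,-1) entry
def pvFindAvail (l : List (Int × Int)) : Option (Int × Int) :=
  l.find? (fun p => p != (-1, -1))

def getNextPosWithAvailList (cur nxt : List (Int × Int)) (d : Int) : Int × Int :=
  if PySem.List.pyGetD cur d (-1, -1) ≠ (-1, -1) then PySem.List.pyGetD cur d (-1, -1)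
  else match pvFindAvail cur with
  | some p => p
  | none =>
    if PySem.List.pyGetD nxt d (-1, -1) ≠ (-1, -1) then PySem.List.pyGetD nxt d (-1, -1)
    else match pvFindAvail nxt with
    | some p => p
    | none => (-1, -1)

-- answer[i][j] read/write; exact: A only reads/writes after the 0 ≤ · < n bounds check
-- (the write answer[ci][cj] raises only for n < 0, which Pre_solution excludes)
def pvGrid2Get (g : List (List Int)) (i j : Int) : Int :=
  PySem.List.pyGetD (PySem.List.pyGetD g i []) j 0

def pvGrid2Set (g : List (List Int)) (i j : Int) (v : Int) : List (List Int) :=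
  PySem.List.pySetD g i (PySem.List.pySetD (PySem.List.pyGetD g i []) j v)

def pvInit4 : List (Int × Int) := [(-1, -1), (-1, -1), (-1, -1), (-1, -1)]

-- the body of 'for dirIdx in range(4)': classify neighbour dirIdx into cur/next avail list
def pvScanStep (n : Int) (ans : List (List Int)) (ci cj : Int)
    (st : List (Int × Int) × List (Int × Int)) (d : Int) : List (Int × Int) × List (Int × Int) :=
  let q := getNextPose ci cj d
  if ¬ (0 ≤ q.1 ∧ q.1 < n ∧ 0 ≤ q.2 ∧ q.2 < n) then st
  else if pvGrid2Get ans q.1 q.2 ≠ 0 then st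
  else if getSiteOfPose ci cj = getSiteOfPose q.1 q.2 then (PySem.List.pySetD st.1 d q, st.2)
  else (st.1, PySem.List.pySetD st.2 d q)

-- 'while num <= target_num': num increases by 1 each pass
def pvLoopA (n : Int) (dir : Int) (ans : List (List Int)) (num : Int)
    (cur nxt : List (Int × Int)) : List (List Int) :=
  if h : num ≤ n * n then
    let p := getNextPosWithAvailList cur nxt dir
    let ans' := pvGrid2Set ans p.1 p.2 num
    let st := (PySem.List.pyRange 0 4 1).foldl (pvScanStep n ans' p.1 p.2) (pvInit4, pvInit4)
    pvLoopA n dir ans' (num + 1) st.1 st.2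
  else ans
termination_by (n * n + 1 - num).toNat
decreasing_by omega

def solution (n : Int) (horizontal : Bool) : List (List Int) :=
  let ans := (PySem.List.pyRange 0 n 1).map (fun _ => (PySem.List.pyRange 0 n 1).map (fun _ => (0 : Int)))
  let dir : Int := if horizontal then 0 else 2
  let cur := PySem.List.pySetD pvInit4 dir (0, 0)
  pvLoopA n dir ans 1 cur pvInit4

-- ===== PORT B =====
def pvLayerCells (k : Nat) : List (Nat × Nat) :=
  let cells := (List.range (k + 1)).map (fun r => (r, k))
    ++ ((List.range k).reverse.map (fun c => (k, c)))
  if k % 2 = 0 then cells.reverse else cells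

def pvAssign (horizontal : Bool) (st : List (List Int) × Int) (cell : Nat × Nat) :
    List (List Int) × Int :=
  let p := if horizontal then cell else (cell.2, cell.1)
  (st.1.set p.1 ((st.1.getD p.1 []).set p.2 st.2), st.2 + 1)

def solution_alt (n : Int) (horizontal : Bool) : List (List Int) :=
  let m := n.toNat
  let g0 := List.replicate m (List.replicate m (0 : Int))
  ((List.range m).foldl (fun st k => (pvLayerCells k).foldl (pvAssign horizontal) st) (g0, 1)).1

-- ===== PRECONDITION & SPEC =====
-- A raises IndexError for n < 0 (empty grid but n*n > 0 numbers to place)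
def Pre_solution (n : Int) (horizontal : Bool) : Prop := 0 ≤ n
instance (n : Int) (horizontal : Bool) : Decidable (Pre_solution n horizontal) := by
  unfold Pre_solution; infer_instance

def pvWitness_solution : Int × Bool := (3, true)

def Spec_solution (n : Int) (horizontal : Bool) (out : List (List Int)) : Prop :=
  out = solution_alt n horizontal
instance (n : Int) (horizontal : Bool) (out : List (List Int)) : Decidable (Spec_solution n horizontal out) := by
  unfold Spec_solution; infer_instance

-- ===== CLAIM (what is proved, stated in full; the proofs are below) =====
def Claim_equal_solution : Prop := ∀ (n : Int) (horizontal : Bool), Dom_solution n horizontal →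
  Pre_solution n horizontal → Spec_solution n horizontal (solution n horizontal)

-- ===== LEMMAS AND PROOFS =====

-- the snake order, horizontal orientation: cell of 0-based index k*k+m (m ≤ 2k) in layer k
def posH (k m : Nat) : Nat × Nat :=
  if k % 2 = 0 then (if m < k then (k, m) else (2 * k - m, k))
  else (if m ≤ k then (m, k) else (k, 2 * k - m))

-- its inverse: 0-based snake index of cell (i, j), horizontal orientation
def idxH (i j : Nat) : Nat :=
  (max i j) * (max i j) +
    (if (max i j) % 2 = 0 then (if j = max i j then 2 * (max i j) - i else j)
     else (if j = max i j then i else 2 * (max i j) - j))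

def posM (h : Bool) (k m : Nat) : Nat × Nat :=
  if h then posH k m else ((posH k m).2, (posH k m).1)
def idxM (h : Bool) (i j : Nat) : Nat := if h then idxH i j else idxH j i

-- grid after the first t numbers are placed, as a function
def pfun (h : Bool) (t : Nat) (i j : Nat) : Int :=
  if idxM h i j < t then (idxM h i j : Int) + 1 else 0
def gridFn (N : Nat) (f : Nat → Nat → Int) : List (List Int) :=
  (List.range N).map (fun i => (List.range N).map (f i))


lemma pv_sq_lt {a b : Nat} (h : a < b) : a * a + 2 * a < b * b := by nlinarith

lemma posH_idx (k m : Nat) (hm : m ≤ 2 * k) :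
    idxH (posH k m).1 (posH k m).2 = k * k + m ∧ max (posH k m).1 (posH k m).2 = k := by
  unfold posH
  split_ifs with h1 h2 h3
  · dsimp only
    have hmax : max k m = k := by omega
    unfold idxH
    rw [hmax, if_pos h1, if_neg (show ¬ m = k by omega)]
    exact ⟨by omega, by omega⟩
  · dsimp only
    have hmax : max (2 * k - m) k = k := by omega
    unfold idxH
    rw [hmax, if_pos h1, if_pos rfl]
    exact ⟨by omega, by omega⟩
  · dsimp only
    have hmax : max m k = k := by omega
    unfold idxH
    rw [hmax, if_neg h1, if_pos rfl]
    exact ⟨by omega, by omega⟩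
  · dsimp only
    have hmax : max k (2 * k - m) = k := by omega
    unfold idxH
    rw [hmax, if_neg h1, if_neg (show ¬ 2 * k - m = k by omega)]
    exact ⟨by omega, by omega⟩

lemma idxH_bounds (i j : Nat) :
    max i j * max i j ≤ idxH i j ∧ idxH i j ≤ max i j * max i j + 2 * max i j := by
  unfold idxH; split_ifs <;> omega

lemma idxH_inj {i j a b : Nat} (h : idxH i j = idxH a b) : i = a ∧ j = b := by
  have h1 := idxH_bounds i j
  have h2 := idxH_bounds a b
  have hk : max i j = max a b := by
    rcases Nat.lt_trichotomy (max i j) (max a b) with hlt | he | hgt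
    · have := pv_sq_lt hlt; omega
    · exact he
    · have := pv_sq_lt hgt; omega
  unfold idxH at h
  rw [hk] at h
  split_ifs at h <;> omega

lemma idxM_inj {h : Bool} {i j a b : Nat} (he : idxM h i j = idxM h a b) : i = a ∧ j = b := by
  cases h <;> simp [idxM] at he
  · exact ⟨(idxH_inj he).2, (idxH_inj he).1⟩
  · exact idxH_inj he

lemma gridFn_get (N : Nat) (f : Nat → Nat → Int) (i j : Nat) (hi : i < N) (hj : j < N) :
    pvGrid2Get (gridFn N f) ↑i ↑j = f i j := by
  simp [pvGrid2Get, gridFn, List.getD_eq_getElem?_getD, hi, hj]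

lemma set_map_range {α : Type} {N i : Nat} (g : Nat → α) (x : α) (hi : i < N) :
    ((List.range N).map g).set i x = (List.range N).map (fun a => if a = i then x else g a) := by
  apply List.ext_getElem
  · simp
  · intro a h1 h2
    simp only [List.getElem_set, List.getElem_map, List.getElem_range]
    by_cases hc : i = a
    · subst hc; simp
    · rw [if_neg hc, if_neg (fun hh => hc hh.symm)]

lemma getD_map_range' {α : Type} {N i : Nat} (g : Nat → α) (d : α) (hi : i < N) :
    ((List.range N).map g).getD i d = g i := by
  simp [List.getD_eq_getElem?_getD, hi]

lemma gridFn_set (N : Nat) (f : Nat → Nat → Int) (i j : Nat) (v : Int) (hi : i < N) (hj : j < N) :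
    pvGrid2Set (gridFn N f) ↑i ↑j v = gridFn N (fun a b => if a = i ∧ b = j then v else f a b) := by
  simp only [pvGrid2Set, PySem.List.pySetD_natCast, PySem.List.pyGetD_natCast, gridFn]
  rw [getD_map_range' _ _ hi, set_map_range _ _ hj, set_map_range _ _ hi]
  apply List.map_congr_left
  intro a ha
  by_cases hc : a = i
  · subst hc
    rw [if_pos rfl]
    apply List.map_congr_left
    intro b hb
    by_cases hbj : b = j
    · simp [hbj]
    · rw [if_neg hbj, if_neg (fun hh => hbj hh.2)]
  · rw [if_neg hc]
    apply List.map_congr_left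
    intro b hb
    rw [if_neg (fun hh => hc hh.1)]

lemma gridFn_congr {N : Nat} {f g : Nat → Nat → Int}
    (he : ∀ a, a < N → ∀ b, b < N → f a b = g a b) : gridFn N f = gridFn N g := by
  unfold gridFn
  apply List.map_congr_left
  intro a ha
  apply List.map_congr_left
  intro b hb
  exact he a (List.mem_range.1 ha) b (List.mem_range.1 hb)

lemma gridFn_write (N : Nat) (h : Bool) (t i j : Nat) (hi : i < N) (hj : j < N)
    (hidx : idxM h i j = t) :
    pvGrid2Set (gridFn N (pfun h t)) ↑i ↑j ((t : Int) + 1) = gridFn N (pfun h (t + 1)) := by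
  rw [gridFn_set N _ i j _ hi hj]
  apply gridFn_congr
  intro a _ b _
  by_cases hab : a = i ∧ b = j
  · obtain ⟨rfl, rfl⟩ := hab
    simp [pfun, hidx]
  · have hne : idxM h a b ≠ t := fun hc => hab (idxM_inj (hidx ▸ hc))
    rw [if_neg hab]
    unfold pfun
    split_ifs with h1 h2 <;> try rfl
    · exfalso; omega
    · exfalso; omega

-- decision value for direction d at cell (ci,cj): entry the scan puts in cur_site_avail_list
def scCur (n : Int) (ans : List (List Int)) (ci cj : Int) (d : Int) : Int × Int :=
  let q := getNextPose ci cj d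
  if ¬ (0 ≤ q.1 ∧ q.1 < n ∧ 0 ≤ q.2 ∧ q.2 < n) then (-1, -1)
  else if pvGrid2Get ans q.1 q.2 ≠ 0 then (-1, -1)
  else if getSiteOfPose ci cj = getSiteOfPose q.1 q.2 then q else (-1, -1)

def scNxt (n : Int) (ans : List (List Int)) (ci cj : Int) (d : Int) : Int × Int :=
  let q := getNextPose ci cj d
  if ¬ (0 ≤ q.1 ∧ q.1 < n ∧ 0 ≤ q.2 ∧ q.2 < n) then (-1, -1)
  else if pvGrid2Get ans q.1 q.2 ≠ 0 then (-1, -1)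
  else if getSiteOfPose ci cj = getSiteOfPose q.1 q.2 then (-1, -1) else q

def pvUpd (l : List (Int × Int)) (d : Int) (v : Int × Int) : List (Int × Int) :=
  if v = (-1, -1) then l else PySem.List.pySetD l d v

lemma scanStep_eq (n : Int) (ans : List (List Int)) (ci cj : Int)
    (c x : List (Int × Int)) (d : Int) :
    pvScanStep n ans ci cj (c, x) d =
      (pvUpd c d (scCur n ans ci cj d), pvUpd x d (scNxt n ans ci cj d)) := by
  unfold pvScanStep scCur scNxt
  simp only []
  by_cases h1 : (0 ≤ (getNextPose ci cj d).1 ∧ (getNextPose ci cj d).1 < n ∧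
      0 ≤ (getNextPose ci cj d).2 ∧ (getNextPose ci cj d).2 < n)
  · rw [if_neg (not_not_intro h1), if_neg (not_not_intro h1), if_neg (not_not_intro h1)]
    have hqe : getNextPose ci cj d ≠ (-1, -1) := by
      intro he
      rw [he] at h1
      exact absurd h1.1 (by norm_num)
    by_cases h2 : pvGrid2Get ans (getNextPose ci cj d).1 (getNextPose ci cj d).2 ≠ 0
    · rw [if_pos h2, if_pos h2, if_pos h2]
      unfold pvUpd
      rw [if_pos rfl, if_pos rfl]
    · rw [if_neg h2, if_neg h2, if_neg h2]
      by_cases h3 : getSiteOfPose ci cj = getSiteOfPose (getNextPose ci cj d).1 (getNextPose ci cj d).2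
      · rw [if_pos h3, if_pos h3, if_pos h3]
        unfold pvUpd
        rw [if_neg hqe, if_pos rfl]
      · rw [if_neg h3, if_neg h3, if_neg h3]
        unfold pvUpd
        rw [if_pos rfl, if_neg hqe]
  · rw [if_pos h1, if_pos h1, if_pos h1]
    unfold pvUpd
    rw [if_pos rfl, if_pos rfl]

lemma pvUpd4 (v0 v1 v2 v3 : Int × Int) :
    pvUpd (pvUpd (pvUpd (pvUpd pvInit4 0 v0) 1 v1) 2 v2) 3 v3 = [v0, v1, v2, v3] := by
  unfold pvUpd pvInit4
  split_ifs <;> subst_vars <;> rfl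

lemma foldEval (n : Int) (ans : List (List Int)) (ci cj : Int) :
    (PySem.List.pyRange 0 4 1).foldl (pvScanStep n ans ci cj) (pvInit4, pvInit4) =
      ([scCur n ans ci cj 0, scCur n ans ci cj 1, scCur n ans ci cj 2, scCur n ans ci cj 3],
       [scNxt n ans ci cj 0, scNxt n ans ci cj 1, scNxt n ans ci cj 2, scNxt n ans ci cj 3]) := by
  have h4 : PySem.List.pyRange 0 4 1 = [0, 1, 2, 3] := by decide
  rw [h4]
  simp only [List.foldl_cons, List.foldl_nil]
  rw [scanStep_eq, scanStep_eq, scanStep_eq, scanStep_eq]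
  rw [Prod.ext_iff]
  exact ⟨pvUpd4 _ _ _ _, pvUpd4 _ _ _ _⟩

lemma selH_c0 {c0 c1 c2 c3 : Int × Int} (x : List (Int × Int)) (h : c0 ≠ (-1, -1)) :
    getNextPosWithAvailList [c0, c1, c2, c3] x 0 = c0 := by
  unfold getNextPosWithAvailList
  simp [pysem, h]

lemma selH_c1 {c1 c2 c3 : Int × Int} (x : List (Int × Int)) (h : c1 ≠ (-1, -1)) :
    getNextPosWithAvailList [(-1, -1), c1, c2, c3] x 0 = c1 := by
  unfold getNextPosWithAvailList pvFindAvail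
  simp [pysem, List.find?, bne_iff_ne.mpr h]

lemma selH_c2 {c2 c3 : Int × Int} (x : List (Int × Int)) (h : c2 ≠ (-1, -1)) :
    getNextPosWithAvailList [(-1, -1), (-1, -1), c2, c3] x 0 = c2 := by
  unfold getNextPosWithAvailList pvFindAvail
  simp [pysem, List.find?, bne_iff_ne.mpr h]

lemma selH_c3 {c3 : Int × Int} (x : List (Int × Int)) (h : c3 ≠ (-1, -1)) :
    getNextPosWithAvailList [(-1, -1), (-1, -1), (-1, -1), c3] x 0 = c3 := by
  unfold getNextPosWithAvailList pvFindAvail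
  simp [pysem, List.find?, bne_iff_ne.mpr h]

lemma selH_x0 {x0 x1 x2 x3 : Int × Int} (h : x0 ≠ (-1, -1)) :
    getNextPosWithAvailList [(-1, -1), (-1, -1), (-1, -1), (-1, -1)] [x0, x1, x2, x3] 0 = x0 := by
  unfold getNextPosWithAvailList pvFindAvail
  simp [pysem, List.find?, h]

lemma selH_x2 {x2 x3 : Int × Int} (h : x2 ≠ (-1, -1)) :
    getNextPosWithAvailList [(-1, -1), (-1, -1), (-1, -1), (-1, -1)] [(-1, -1), (-1, -1), x2, x3] 0 = x2 := by
  unfold getNextPosWithAvailList pvFindAvail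
  simp [pysem, List.find?, bne_iff_ne.mpr h]

lemma selV_c2 {c0 c1 c2 c3 : Int × Int} (x : List (Int × Int)) (h : c2 ≠ (-1, -1)) :
    getNextPosWithAvailList [c0, c1, c2, c3] x 2 = c2 := by
  unfold getNextPosWithAvailList
  simp [pysem, h]

lemma selV_c0 {c0 c1 c3 : Int × Int} (x : List (Int × Int)) (h : c0 ≠ (-1, -1)) :
    getNextPosWithAvailList [c0, c1, (-1, -1), c3] x 2 = c0 := by
  unfold getNextPosWithAvailList pvFindAvail
  simp [pysem, List.find?, bne_iff_ne.mpr h]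

lemma selV_c1 {c1 c3 : Int × Int} (x : List (Int × Int)) (h : c1 ≠ (-1, -1)) :
    getNextPosWithAvailList [(-1, -1), c1, (-1, -1), c3] x 2 = c1 := by
  unfold getNextPosWithAvailList pvFindAvail
  simp [pysem, List.find?, bne_iff_ne.mpr h]

lemma selV_c3 {c3 : Int × Int} (x : List (Int × Int)) (h : c3 ≠ (-1, -1)) :
    getNextPosWithAvailList [(-1, -1), (-1, -1), (-1, -1), c3] x 2 = c3 := by
  unfold getNextPosWithAvailList pvFindAvail
  simp [pysem, List.find?, bne_iff_ne.mpr h]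

lemma selV_x2 {x0 x1 x2 x3 : Int × Int} (h : x2 ≠ (-1, -1)) :
    getNextPosWithAvailList [(-1, -1), (-1, -1), (-1, -1), (-1, -1)] [x0, x1, x2, x3] 2 = x2 := by
  unfold getNextPosWithAvailList pvFindAvail
  simp [pysem, List.find?, h]

lemma selV_x0 {x0 x1 x3 : Int × Int} (h : x0 ≠ (-1, -1)) :
    getNextPosWithAvailList [(-1, -1), (-1, -1), (-1, -1), (-1, -1)] [x0, x1, (-1, -1), x3] 2 = x0 := by
  unfold getNextPosWithAvailList pvFindAvail
  simp [pysem, List.find?, bne_iff_ne.mpr h]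

lemma nb0 (pi pj : Int) : getNextPose pi pj 0 = (pi, pj + 1) := by
  unfold getNextPose pvDi pvDj; norm_num [pysem]
lemma nb1 (pi pj : Int) : getNextPose pi pj 1 = (pi, pj - 1) := by
  unfold getNextPose pvDi pvDj; norm_num [pysem]; ring
lemma nb2 (pi pj : Int) : getNextPose pi pj 2 = (pi + 1, pj) := by
  unfold getNextPose
  rw [show PySem.List.pyGetD pvDi 2 0 = 1 by decide, show PySem.List.pyGetD pvDj 2 0 = 0 by decide]
  simp
lemma nb3 (pi pj : Int) : getNextPose pi pj 3 = (pi - 1, pj) := by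
  unfold getNextPose
  rw [show PySem.List.pyGetD pvDi 3 0 = -1 by decide, show PySem.List.pyGetD pvDj 3 0 = 0 by decide]
  norm_num [sub_eq_add_neg]

lemma pfun_ne_zero (h : Bool) (t a b : Nat) : pfun h t a b ≠ 0 ↔ idxM h a b < t := by
  unfold pfun
  split_ifs with hc
  · simp only [iff_true_intro hc, iff_true]
    omega
  · simp [hc]

lemma sc_out {n : Int} {ans : List (List Int)} {ci cj d : Int}
    (hr : ¬ (0 ≤ (getNextPose ci cj d).1 ∧ (getNextPose ci cj d).1 < n ∧
      0 ≤ (getNextPose ci cj d).2 ∧ (getNextPose ci cj d).2 < n)) :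
    scCur n ans ci cj d = (-1, -1) ∧ scNxt n ans ci cj d = (-1, -1) := by
  unfold scCur scNxt
  simp only []
  rw [if_pos hr, if_pos hr]
  exact ⟨rfl, rfl⟩

lemma site_cast (a b : Nat) : getSiteOfPose (a : Int) (b : Int) = ((max a b : Nat) : Int) := by
  unfold getSiteOfPose
  simp [Nat.cast_max]

lemma scCur_ne_site {n : Int} {ans : List (List Int)} {pi pj a b : Nat} {d : Int}
    (hq : getNextPose ↑pi ↑pj d = ((a : Int), (b : Int))) (hs : max pi pj ≠ max a b) :
    scCur n ans ↑pi ↑pj d = (-1, -1) := by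
  unfold scCur
  simp only [hq]
  split_ifs with h1 h2 h3 <;> try rfl
  exfalso
  rw [site_cast, site_cast] at h3
  exact hs (Nat.cast_injective h3)

lemma scCur_filled {N : Nat} {h : Bool} {t : Nat} {pi pj a b : Nat} {d : Int}
    (hq : getNextPose ↑pi ↑pj d = ((a : Int), (b : Int))) (ha : a < N) (hb : b < N)
    (hfill : idxM h a b < t) :
    scCur ↑N (gridFn N (pfun h t)) ↑pi ↑pj d = (-1, -1) := by
  unfold scCur
  simp only [hq]
  rw [if_neg (not_not_intro ⟨by positivity, by exact_mod_cast ha, by positivity, by exact_mod_cast hb⟩)]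
  rw [if_pos (by rw [gridFn_get N _ a b ha hb]; exact (pfun_ne_zero h t a b).mpr hfill)]

lemma scNxt_filled {N : Nat} {h : Bool} {t : Nat} {pi pj a b : Nat} {d : Int}
    (hq : getNextPose ↑pi ↑pj d = ((a : Int), (b : Int))) (ha : a < N) (hb : b < N)
    (hfill : idxM h a b < t) :
    scNxt ↑N (gridFn N (pfun h t)) ↑pi ↑pj d = (-1, -1) := by
  unfold scNxt
  simp only [hq]
  rw [if_neg (not_not_intro ⟨by positivity, by exact_mod_cast ha, by positivity, by exact_mod_cast hb⟩)]
  rw [if_pos (by rw [gridFn_get N _ a b ha hb]; exact (pfun_ne_zero h t a b).mpr hfill)]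

lemma scCur_hit {N : Nat} {h : Bool} {t : Nat} {pi pj a b : Nat} {d : Int}
    (hq : getNextPose ↑pi ↑pj d = ((a : Int), (b : Int))) (ha : a < N) (hb : b < N)
    (hfill : ¬ idxM h a b < t) (hs : max pi pj = max a b) :
    scCur ↑N (gridFn N (pfun h t)) ↑pi ↑pj d = ((a : Int), (b : Int)) := by
  unfold scCur
  simp only [hq]
  rw [if_neg (not_not_intro ⟨by positivity, by exact_mod_cast ha, by positivity, by exact_mod_cast hb⟩)]
  rw [if_neg (by rw [gridFn_get N _ a b ha hb]; exact fun hc => hfill ((pfun_ne_zero h t a b).mp hc))]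
  rw [if_pos (by rw [site_cast, site_cast]; exact congrArg _ hs)]

lemma scNxt_hit {N : Nat} {h : Bool} {t : Nat} {pi pj a b : Nat} {d : Int}
    (hq : getNextPose ↑pi ↑pj d = ((a : Int), (b : Int))) (ha : a < N) (hb : b < N)
    (hfill : ¬ idxM h a b < t) (hs : max pi pj ≠ max a b) :
    scNxt ↑N (gridFn N (pfun h t)) ↑pi ↑pj d = ((a : Int), (b : Int)) := by
  unfold scNxt
  simp only [hq]
  rw [if_neg (not_not_intro ⟨by positivity, by exact_mod_cast ha, by positivity, by exact_mod_cast hb⟩)]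
  rw [if_neg (by rw [gridFn_get N _ a b ha hb]; exact fun hc => hfill ((pfun_ne_zero h t a b).mp hc))]
  rw [if_neg (by rw [site_cast, site_cast]; exact fun hc => hs (Nat.cast_injective hc))]

lemma idxH_row {k j : Nat} (hj : j < k) :
    idxH k j = if k % 2 = 0 then k * k + j else k * k + 2 * k - j := by
  unfold idxH
  rw [Nat.max_eq_left (le_of_lt hj)]
  split_ifs <;> omega

lemma idxH_col {i k : Nat} (hi : i ≤ k) :
    idxH i k = if k % 2 = 0 then k * k + 2 * k - i else k * k + i := by
  unfold idxH
  rw [Nat.max_eq_right hi]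
  split_ifs <;> omega

lemma pv_lt_of_sq_lt {a b : Nat} (hab : a * a < b * b) : a < b := by
  by_contra hc
  push_neg at hc
  exact absurd (Nat.mul_le_mul hc hc) (by omega)

lemma idxM_true (a b : Nat) : idxM true a b = idxH a b := rfl
lemma idxM_false (a b : Nat) : idxM false a b = idxH b a := rfl
lemma posM_true (k m : Nat) : posM true k m = posH k m := rfl
lemma posM_false (k m : Nat) : posM false k m = ((posH k m).2, (posH k m).1) := rfl

lemma pairNe (a b : Nat) : ((a : Int), (b : Int)) ≠ (-1, -1) := by
  intro hc
  rw [Prod.mk.injEq] at hc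
  omega

lemma stepSel (h : Bool) (N k m pi pj : Nat) (hm : m ≤ 2 * k) (ht : k * k + m + 1 < N * N)
    (hp : posM h k m = (pi, pj)) :
    getNextPosWithAvailList
      [scCur ↑N (gridFn N (pfun h (k * k + m + 1))) ↑pi ↑pj 0,
       scCur ↑N (gridFn N (pfun h (k * k + m + 1))) ↑pi ↑pj 1,
       scCur ↑N (gridFn N (pfun h (k * k + m + 1))) ↑pi ↑pj 2,
       scCur ↑N (gridFn N (pfun h (k * k + m + 1))) ↑pi ↑pj 3]
      [scNxt ↑N (gridFn N (pfun h (k * k + m + 1))) ↑pi ↑pj 0,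
       scNxt ↑N (gridFn N (pfun h (k * k + m + 1))) ↑pi ↑pj 1,
       scNxt ↑N (gridFn N (pfun h (k * k + m + 1))) ↑pi ↑pj 2,
       scNxt ↑N (gridFn N (pfun h (k * k + m + 1))) ↑pi ↑pj 3]
      (if h then 0 else 2) =
    (↑(posM h (if m = 2 * k then k + 1 else k) (if m = 2 * k then 0 else m + 1)).1,
     ↑(posM h (if m = 2 * k then k + 1 else k) (if m = 2 * k then 0 else m + 1)).2) := by
  have hkN : k < N := pv_lt_of_sq_lt (by omega)
  by_cases hm2 : m = 2 * k
  · -- transition to the next layer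
    subst hm2
    have hk1N : k + 1 < N := pv_lt_of_sq_lt (by nlinarith)
    by_cases he : k % 2 = 0
    · -- even layer ends at (0, k) [horizontal]; next cell (0, k+1)
      cases h
      · -- vertical: p = (k, 0); next cell (k+1, 0)
        rw [posM_false] at hp
        unfold posH at hp
        rw [if_pos he, if_neg (by omega)] at hp
        try dsimp only at hp
        obtain ⟨rfl, rfl⟩ : k = pi ∧ 2 * k - 2 * k = pj := Prod.mk.injEq .. ▸ hp
        rw [show 2 * k - 2 * k = 0 by omega]
        simp only [Bool.false_eq_true, if_false]
        -- c1 (left) out of range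
        rw [(sc_out (d := 1) (by rw [nb1]; dsimp only; omega)).1]
        -- c2 (down) different site
        rw [scCur_ne_site (a := k + 1) (b := 0) (d := 2) (by rw [nb2]; push_cast; rfl) (by omega)]
        -- c0 (right): k = 0 different site, k > 0 filled
        by_cases hk0 : k = 0
        · subst hk0
          rw [scCur_ne_site (a := 0) (b := 1) (d := 0) (by rw [nb0]; push_cast; rfl) (by omega)]
          -- c3 (up) out of range
          rw [(sc_out (d := 3) (by rw [nb3]; dsimp only; omega)).1]
          -- x2 (down) next-site hit
          rw [scNxt_hit (a := 1) (b := 0) (d := 2) (by rw [nb2]; push_cast; rfl) hk1N hkN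
            (by rw [idxM_false, idxH_col (by omega), if_neg (by decide : ¬ 1 % 2 = 0)]; omega) (by omega)]
          rw [selV_x2 (pairNe 1 0)]
          rw [posM_false]; unfold posH
          split_ifs <;> simp <;> omega
        · rw [scCur_filled (a := k) (b := 1) (d := 0) (by rw [nb0]; push_cast; rfl) hkN
            (by omega)
            (by rw [idxM_false, idxH_col (by omega), if_pos he]; omega)]
          -- c3 (up) different site
          rw [scCur_ne_site (a := k - 1) (b := 0)
            (d := 3) (by rw [nb3]; rw [show (k : Int) - 1 = ((k - 1 : Nat) : Int) by omega]) (by omega)]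
          -- x2 (down) next-site hit
          rw [scNxt_hit (a := k + 1) (b := 0) (d := 2) (by rw [nb2]; push_cast; rfl) hk1N (by omega)
            (by rw [idxM_false, idxH_col (by omega), if_neg (show ¬ (k + 1) % 2 = 0 by omega)]
                have hexp : (k + 1) * (k + 1) = k * k + 2 * k + 1 := by ring
                omega) (by omega)]
          rw [selV_x2 (pairNe (k + 1) 0)]
          rw [posM_false]; unfold posH
          split_ifs <;> simp <;> omega
      · -- horizontal: p = (0, k); next cell (0, k+1)
        rw [posM_true] at hp
        unfold posH at hp
        rw [if_pos he, if_neg (by omega)] at hp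
        try dsimp only at hp
        obtain ⟨rfl, rfl⟩ : 2 * k - 2 * k = pi ∧ k = pj := Prod.mk.injEq .. ▸ hp
        simp only [if_true]
        rw [show 2 * k - 2 * k = 0 by omega]
        -- c0 (right) different site
        rw [scCur_ne_site (a := 0) (b := k + 1) (d := 0) (by rw [nb0]; push_cast; rfl) (by omega)]
        -- c3 (up) out of range
        rw [(sc_out (d := 3) (by rw [nb3]; dsimp only; omega)).1]
        by_cases hk0 : k = 0
        · subst hk0
          -- c1 (left) out of range
          rw [(sc_out (d := 1) (by rw [nb1]; dsimp only; omega)).1]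
          -- c2 (down) different site
          rw [scCur_ne_site (a := 1) (b := 0) (d := 2) (by rw [nb2]; push_cast; rfl) (by omega)]
          rw [scNxt_hit (a := 0) (b := 1) (d := 0) (by rw [nb0]; push_cast; rfl) hkN hk1N
            (by rw [idxM_true, idxH_col (by omega), if_neg (by decide : ¬ 1 % 2 = 0)]; omega) (by omega)]
          rw [selH_x0 (pairNe 0 1)]
          rw [posM_true]; unfold posH
          split_ifs <;> simp <;> omega
        · -- c1 (left) different site
          rw [scCur_ne_site (a := 0) (b := k - 1)
            (d := 1) (by rw [nb1]; rw [show (k : Int) - 1 = ((k - 1 : Nat) : Int) by omega]) (by omega)]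
          -- c2 (down) filled
          rw [scCur_filled (a := 1) (b := k) (d := 2) (by rw [nb2]; push_cast; rfl) (by omega) hkN
            (by rw [idxM_true, idxH_col (by omega), if_pos he]; omega)]
          rw [scNxt_hit (a := 0) (b := k + 1) (d := 0) (by rw [nb0]; push_cast; rfl) (by omega) hk1N
            (by rw [idxM_true, idxH_col (by omega), if_neg (show ¬ (k + 1) % 2 = 0 by omega)]
                have hexp : (k + 1) * (k + 1) = k * k + 2 * k + 1 := by ring
                omega) (by omega)]
          rw [selH_x0 (pairNe 0 (k + 1))]
          rw [posM_true]; unfold posH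
          split_ifs <;> simp <;> omega
    · -- odd layer ends at (k, 0) [horizontal]; next cell (k+1, 0); k ≥ 1
      have hk1 : 1 ≤ k := by omega
      have hidx01 : idxH k 1 < k * k + 2 * k + 1 := by
        by_cases hk1' : 1 < k
        · rw [idxH_row hk1', if_neg he]; omega
        · rw [show k = 1 by omega]
          decide
      cases h
      · -- vertical: p = (0, k); next cell (0, k+1)
        rw [posM_false] at hp
        unfold posH at hp
        rw [if_neg he, if_neg (by omega)] at hp
        try dsimp only at hp
        obtain ⟨rfl, rfl⟩ : 2 * k - 2 * k = pi ∧ k = pj := Prod.mk.injEq .. ▸ hp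
        simp only [Bool.false_eq_true, if_false]
        rw [show 2 * k - 2 * k = 0 by omega]
        -- c2 (down) filled
        rw [scCur_filled (a := 1) (b := k) (d := 2) (by rw [nb2]; push_cast; rfl) (by omega) hkN
          (by rw [idxM_false]; omega)]
        -- c0 (right) different site
        rw [scCur_ne_site (a := 0) (b := k + 1) (d := 0) (by rw [nb0]; push_cast; rfl) (by omega)]
        -- c1 (left) different site
        rw [scCur_ne_site (a := 0) (b := k - 1)
          (d := 1) (by rw [nb1]; rw [show (k : Int) - 1 = ((k - 1 : Nat) : Int) by omega]) (by omega)]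
        -- c3 (up) out of range
        rw [(sc_out (d := 3) (by rw [nb3]; dsimp only; omega)).1]
        -- x2 (down) filled
        rw [scNxt_filled (a := 1) (b := k) (d := 2) (by rw [nb2]; push_cast; rfl) (by omega) hkN
          (by rw [idxM_false]; omega)]
        -- x0 (right) next-site hit
        rw [scNxt_hit (a := 0) (b := k + 1) (d := 0) (by rw [nb0]; push_cast; rfl) (by omega) hk1N
          (by rw [idxM_false, idxH_row (by omega), if_pos (by omega)]
              have hexp : (k + 1) * (k + 1) = k * k + 2 * k + 1 := by ring
              omega) (by omega)]
        rw [selV_x0 (pairNe 0 (k + 1))]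
        rw [posM_false]; unfold posH
        split_ifs <;> simp <;> omega
      · -- horizontal: p = (k, 0); next cell (k+1, 0)
        rw [posM_true] at hp
        unfold posH at hp
        rw [if_neg he, if_neg (by omega)] at hp
        try dsimp only at hp
        obtain ⟨rfl, rfl⟩ : k = pi ∧ 2 * k - 2 * k = pj := Prod.mk.injEq .. ▸ hp
        simp only [if_true]
        rw [show 2 * k - 2 * k = 0 by omega]
        -- c0 (right) filled
        rw [scCur_filled (a := k) (b := 1) (d := 0) (by rw [nb0]; push_cast; rfl) hkN (by omega)
          (by rw [idxM_true]; omega)]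
        -- c1 (left) out of range
        rw [(sc_out (d := 1) (by rw [nb1]; dsimp only; omega)).1]
        -- c2 (down) different site
        rw [scCur_ne_site (a := k + 1) (b := 0) (d := 2) (by rw [nb2]; push_cast; rfl) (by omega)]
        -- c3 (up) different site
        rw [scCur_ne_site (a := k - 1) (b := 0)
          (d := 3) (by rw [nb3]; rw [show (k : Int) - 1 = ((k - 1 : Nat) : Int) by omega]) (by omega)]
        -- x0 (right) filled
        rw [scNxt_filled (a := k) (b := 1) (d := 0) (by rw [nb0]; push_cast; rfl) hkN (by omega)
          (by rw [idxM_true]; omega)]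
        -- x1 (left) out of range
        rw [(sc_out (d := 1) (by rw [nb1]; dsimp only; omega)).2]
        -- x2 (down) next-site hit
        rw [scNxt_hit (a := k + 1) (b := 0) (d := 2) (by rw [nb2]; push_cast; rfl) hk1N (by omega)
          (by rw [idxM_true, idxH_row (by omega), if_pos (by omega)]
              have hexp : (k + 1) * (k + 1) = k * k + 2 * k + 1 := by ring
              omega) (by omega)]
        rw [selH_x2 (pairNe (k + 1) 0)]
        rw [posM_true]; unfold posH
        split_ifs <;> simp <;> omega
  · -- staying inside layer k; next cell posH k (m+1); here k ≥ 1
    have hk1 : 1 ≤ k := by omega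
    by_cases he : k % 2 = 0
    · by_cases hmk : m < k
      · -- even, on the row (k, m), moving right to (k, m+1)
        have hidx : idxH k (m + 1) = k * k + m + 1 := by
          by_cases hc : m + 1 < k
          · rw [idxH_row hc, if_pos he]
            omega
          · rw [show m + 1 = k by omega, idxH_col (le_refl k), if_pos he]
            omega
        cases h
        · -- vertical: p = (m, k), c2 (down) hit
          rw [posM_false] at hp
          unfold posH at hp
          rw [if_pos he, if_pos hmk] at hp
          try dsimp only at hp
          obtain ⟨rfl, rfl⟩ : m = pi ∧ k = pj := Prod.mk.injEq .. ▸ hp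
          simp only [Bool.false_eq_true, if_false]
          rw [scCur_hit (a := m + 1) (b := k) (d := 2) (by rw [nb2]; push_cast; rfl) (by omega) hkN
            (by rw [idxM_false, hidx]; omega) (by omega)]
          rw [selV_c2 _ (pairNe (m + 1) k)]
          rw [posM_false]; unfold posH
          split_ifs <;> simp <;> omega
        · -- horizontal: p = (k, m), c0 (right) hit
          rw [posM_true] at hp
          unfold posH at hp
          rw [if_pos he, if_pos hmk] at hp
          try dsimp only at hp
          obtain ⟨rfl, rfl⟩ : k = pi ∧ m = pj := Prod.mk.injEq .. ▸ hp
          simp only [if_true]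
          rw [scCur_hit (a := k) (b := m + 1) (d := 0) (by rw [nb0]; push_cast; rfl) hkN (by omega)
            (by rw [idxM_true, hidx]; omega) (by omega)]
          rw [selH_c0 _ (pairNe k (m + 1))]
          rw [posM_true]; unfold posH
          split_ifs <;> simp <;> omega
      · by_cases hmk2 : m = k
        · -- even, at the diagonal (k, k), moving up/left
          rw [hmk2] at ht hp ⊢
          cases h
          · -- vertical: p = (k, k); next (k, k-1) via c1
            rw [posM_false] at hp
            unfold posH at hp
            rw [if_pos he, if_neg (by omega)] at hp
            try dsimp only at hp
            obtain ⟨rfl, rfl⟩ : k = pi ∧ 2 * k - k = pj := Prod.mk.injEq .. ▸ hp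
            rw [show 2 * k - k = k by omega]
            simp only [Bool.false_eq_true, if_false]
            -- c2 (down) different site
            rw [scCur_ne_site (a := k + 1) (b := k) (d := 2) (by rw [nb2]; push_cast; rfl) (by omega)]
            -- c0 (right) different site
            rw [scCur_ne_site (a := k) (b := k + 1) (d := 0) (by rw [nb0]; push_cast; rfl) (by omega)]
            -- c1 (left) hit: (k, k-1), idxH (k-1) k = k*k + 2k - (k-1) = k*k+k+1
            rw [scCur_hit (a := k) (b := k - 1)
              (d := 1) (by rw [nb1]; rw [show (k : Int) - 1 = ((k - 1 : Nat) : Int) by omega]) hkN (by omega)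
              (by rw [idxM_false, idxH_col (by omega), if_pos he]; omega) (by omega)]
            rw [selV_c1 _ (pairNe k (k - 1))]
            rw [posM_false]; unfold posH
            split_ifs <;> simp <;> omega
          · -- horizontal: p = (k, k); next (k-1, k) via c3
            rw [posM_true] at hp
            unfold posH at hp
            rw [if_pos he, if_neg (by omega)] at hp
            try dsimp only at hp
            obtain ⟨rfl, rfl⟩ : 2 * k - k = pi ∧ k = pj := Prod.mk.injEq .. ▸ hp
            rw [show 2 * k - k = k by omega]
            simp only [if_true]
            -- c0 (right) different site
            rw [scCur_ne_site (a := k) (b := k + 1) (d := 0) (by rw [nb0]; push_cast; rfl) (by omega)]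
            -- c1 (left) filled
            rw [scCur_filled (a := k) (b := k - 1)
              (d := 1) (by rw [nb1]; rw [show (k : Int) - 1 = ((k - 1 : Nat) : Int) by omega]) hkN (by omega)
              (by rw [idxM_true, idxH_row (by omega), if_pos he]; omega)]
            -- c2 (down) different site
            rw [scCur_ne_site (a := k + 1) (b := k) (d := 2) (by rw [nb2]; push_cast; rfl) (by omega)]
            -- c3 (up) hit
            rw [scCur_hit (a := k - 1) (b := k)
              (d := 3) (by rw [nb3]; rw [show (k : Int) - 1 = ((k - 1 : Nat) : Int) by omega]) (by omega) hkN
              (by rw [idxM_true, idxH_col (by omega), if_pos he]; omega) (by omega)]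
            rw [selH_c3 _ (pairNe (k - 1) k)]
            rw [posM_true]; unfold posH
            split_ifs <;> simp <;> omega
        · -- even, on the column (r, k) with r = 2k - m, 0 < r < k, moving up
          have hr1 : 1 ≤ 2 * k - m := by omega
          have hrk : 2 * k - m < k := by omega
          cases h
          · -- vertical: p = (k, r); next (k, r-1) via c1
            rw [posM_false] at hp
            unfold posH at hp
            rw [if_pos he, if_neg (by omega)] at hp
            try dsimp only at hp
            obtain ⟨rfl, rfl⟩ : k = pi ∧ 2 * k - m = pj := Prod.mk.injEq .. ▸ hp
            simp only [Bool.false_eq_true, if_false]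
            -- c2 (down) different site
            rw [scCur_ne_site (a := k + 1) (b := 2 * k - m) (d := 2) (by rw [nb2]; push_cast; rfl) (by omega)]
            -- c0 (right) filled: (k, r+1), idxH (r+1) k = k*k + 2k - (r+1) = k*k + m - 1
            rw [scCur_filled (a := k) (b := 2 * k - m + 1) (d := 0) (by rw [nb0]; push_cast; rfl) hkN (by omega)
              (by rw [idxM_false, idxH_col (by omega), if_pos he]; omega)]
            -- c1 (left) hit: (k, r-1), idxH (r-1) k = k*k + 2k - (r-1) = k*k+m+1
            rw [scCur_hit (a := k) (b := 2 * k - m - 1)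
              (d := 1) (by rw [nb1]; rw [show ((2 * k - m : Nat) : Int) - 1 = ((2 * k - m - 1 : Nat) : Int) by omega])
              hkN (by omega)
              (by rw [idxM_false, idxH_col (by omega), if_pos he]; omega) (by omega)]
            rw [selV_c1 _ (pairNe k (2 * k - m - 1))]
            rw [posM_false]; unfold posH
            split_ifs <;> simp <;> omega
          · -- horizontal: p = (r, k); next (r-1, k) via c3
            rw [posM_true] at hp
            unfold posH at hp
            rw [if_pos he, if_neg (by omega)] at hp
            try dsimp only at hp
            obtain ⟨rfl, rfl⟩ : 2 * k - m = pi ∧ k = pj := Prod.mk.injEq .. ▸ hp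
            simp only [if_true]
            -- c0 (right) different site
            rw [scCur_ne_site (a := 2 * k - m) (b := k + 1) (d := 0) (by rw [nb0]; push_cast; rfl) (by omega)]
            -- c1 (left) different site: (r, k-1), max = k-1
            rw [scCur_ne_site (a := 2 * k - m) (b := k - 1)
              (d := 1) (by rw [nb1]; rw [show (k : Int) - 1 = ((k - 1 : Nat) : Int) by omega]) (by omega)]
            -- c2 (down) filled: (r+1, k), idxH (r+1) k = k*k + 2k - (r+1) = k*k+m-1
            rw [scCur_filled (a := 2 * k - m + 1) (b := k) (d := 2) (by rw [nb2]; push_cast; rfl) (by omega) hkN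
              (by rw [idxM_true, idxH_col (by omega), if_pos he]; omega)]
            -- c3 (up) hit
            rw [scCur_hit (a := 2 * k - m - 1) (b := k)
              (d := 3) (by rw [nb3]; rw [show ((2 * k - m : Nat) : Int) - 1 = ((2 * k - m - 1 : Nat) : Int) by omega])
              (by omega) hkN
              (by rw [idxM_true, idxH_col (by omega), if_pos he]; omega) (by omega)]
            rw [selH_c3 _ (pairNe (2 * k - m - 1) k)]
            rw [posM_true]; unfold posH
            split_ifs <;> simp <;> omega
    · -- odd layer
      by_cases hmk : m < k
      · -- odd, on the column (m, k), moving down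
        have hidx : idxH (m + 1) k = k * k + m + 1 := by
          rw [idxH_col (by omega), if_neg he]
          omega
        cases h
        · -- vertical: p = (k, m); next (k, m+1) via c0 (after c2 empty)
          rw [posM_false] at hp
          unfold posH at hp
          rw [if_neg he, if_pos (by omega)] at hp
          try dsimp only at hp
          obtain ⟨rfl, rfl⟩ : k = pi ∧ m = pj := Prod.mk.injEq .. ▸ hp
          simp only [Bool.false_eq_true, if_false]
          -- c2 (down) different site
          rw [scCur_ne_site (a := k + 1) (b := m) (d := 2) (by rw [nb2]; push_cast; rfl) (by omega)]
          -- c0 (right) hit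
          rw [scCur_hit (a := k) (b := m + 1) (d := 0) (by rw [nb0]; push_cast; rfl) hkN (by omega)
            (by rw [idxM_false, hidx]; omega) (by omega)]
          rw [selV_c0 _ (pairNe k (m + 1))]
          rw [posM_false]; unfold posH
          split_ifs <;> simp <;> omega
        · -- horizontal: p = (m, k); next (m+1, k) via c2
          rw [posM_true] at hp
          unfold posH at hp
          rw [if_neg he, if_pos (by omega)] at hp
          try dsimp only at hp
          obtain ⟨rfl, rfl⟩ : m = pi ∧ k = pj := Prod.mk.injEq .. ▸ hp
          simp only [if_true]
          -- c0 (right) different site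
          rw [scCur_ne_site (a := m) (b := k + 1) (d := 0) (by rw [nb0]; push_cast; rfl) (by omega)]
          -- c1 (left) different site: (m, k-1), max = k-1
          rw [scCur_ne_site (a := m) (b := k - 1)
            (d := 1) (by rw [nb1]; rw [show (k : Int) - 1 = ((k - 1 : Nat) : Int) by omega]) (by omega)]
          -- c2 (down) hit
          rw [scCur_hit (a := m + 1) (b := k) (d := 2) (by rw [nb2]; push_cast; rfl) (by omega) hkN
            (by rw [idxM_true, hidx]; omega) (by omega)]
          rw [selH_c2 _ (pairNe (m + 1) k)]
          rw [posM_true]; unfold posH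
          split_ifs <;> simp <;> omega
      · by_cases hmk2 : m = k
        · -- odd, at the diagonal (k, k)
          rw [hmk2] at ht hp ⊢
          cases h
          · -- vertical: p = (k, k); next (k-1, k) via c3
            rw [posM_false] at hp
            unfold posH at hp
            rw [if_neg he, if_pos (le_refl k)] at hp
            try dsimp only at hp
            obtain ⟨rfl, rfl⟩ : k = pi ∧ k = pj := Prod.mk.injEq .. ▸ hp
            simp only [Bool.false_eq_true, if_false]
            -- c2 (down) different site
            rw [scCur_ne_site (a := k + 1) (b := k) (d := 2) (by rw [nb2]; push_cast; rfl) (by omega)]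
            -- c0 (right) different site
            rw [scCur_ne_site (a := k) (b := k + 1) (d := 0) (by rw [nb0]; push_cast; rfl) (by omega)]
            -- c1 (left) filled: (k, k-1), idxH (k-1) k = k*k + (k-1)
            rw [scCur_filled (a := k) (b := k - 1)
              (d := 1) (by rw [nb1]; rw [show (k : Int) - 1 = ((k - 1 : Nat) : Int) by omega]) hkN (by omega)
              (by rw [idxM_false, idxH_col (by omega), if_neg he]; omega)]
            -- c3 (up) hit: (k-1, k), idxH k (k-1) = k*k + 2k - (k-1) = k*k+k+1
            rw [scCur_hit (a := k - 1) (b := k)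
              (d := 3) (by rw [nb3]; rw [show (k : Int) - 1 = ((k - 1 : Nat) : Int) by omega]) (by omega) hkN
              (by rw [idxM_false, idxH_row (by omega), if_neg he]; omega) (by omega)]
            rw [selV_c3 _ (pairNe (k - 1) k)]
            rw [posM_false]; unfold posH
            split_ifs <;> simp <;> omega
          · -- horizontal: p = (k, k); next (k, k-1) via c1
            rw [posM_true] at hp
            unfold posH at hp
            rw [if_neg he, if_pos (le_refl k)] at hp
            try dsimp only at hp
            obtain ⟨rfl, rfl⟩ : k = pi ∧ k = pj := Prod.mk.injEq .. ▸ hp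
            simp only [if_true]
            -- c0 (right) different site
            rw [scCur_ne_site (a := k) (b := k + 1) (d := 0) (by rw [nb0]; push_cast; rfl) (by omega)]
            -- c1 (left) hit: (k, k-1), idxH k (k-1) = k*k + 2k - (k-1)
            rw [scCur_hit (a := k) (b := k - 1)
              (d := 1) (by rw [nb1]; rw [show (k : Int) - 1 = ((k - 1 : Nat) : Int) by omega]) hkN (by omega)
              (by rw [idxM_true, idxH_row (by omega), if_neg he]; omega) (by omega)]
            rw [selH_c1 _ (pairNe k (k - 1))]
            rw [posM_true]; unfold posH
            split_ifs <;> simp <;> omega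
        · -- odd, on the row (k, c) with c = 2k - m, 0 < c < k, moving left
          have hc1 : 1 ≤ 2 * k - m := by omega
          have hck : 2 * k - m < k := by omega
          cases h
          · -- vertical: p = (c, k); next (c-1, k) via c3
            rw [posM_false] at hp
            unfold posH at hp
            rw [if_neg he, if_neg (by omega)] at hp
            try dsimp only at hp
            obtain ⟨rfl, rfl⟩ : 2 * k - m = pi ∧ k = pj := Prod.mk.injEq .. ▸ hp
            simp only [Bool.false_eq_true, if_false]
            -- c2 (down) filled: (c+1, k), idxH k (c+1): row if c+1<k else diagonal
            have hidxd : idxH k (2 * k - m + 1) < k * k + m + 1 := by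
              by_cases hd : 2 * k - m + 1 < k
              · rw [idxH_row hd, if_neg he]; omega
              · rw [show 2 * k - m + 1 = k by omega, idxH_col (le_refl k), if_neg he]; omega
            rw [scCur_filled (a := 2 * k - m + 1) (b := k) (d := 2) (by rw [nb2]; push_cast; rfl) (by omega) hkN
              (by rw [idxM_false]; omega)]
            -- c0 (right) different site
            rw [scCur_ne_site (a := 2 * k - m) (b := k + 1) (d := 0) (by rw [nb0]; push_cast; rfl) (by omega)]
            -- c1 (left) different site
            rw [scCur_ne_site (a := 2 * k - m) (b := k - 1)
              (d := 1) (by rw [nb1]; rw [show (k : Int) - 1 = ((k - 1 : Nat) : Int) by omega]) (by omega)]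
            -- c3 (up) hit: (c-1, k), idxH k (c-1) = k*k + 2k - (c-1) = k*k+m+1
            rw [scCur_hit (a := 2 * k - m - 1) (b := k)
              (d := 3) (by rw [nb3]; rw [show ((2 * k - m : Nat) : Int) - 1 = ((2 * k - m - 1 : Nat) : Int) by omega])
              (by omega) hkN
              (by rw [idxM_false, idxH_row (by omega), if_neg he]; omega) (by omega)]
            rw [selV_c3 _ (pairNe (2 * k - m - 1) k)]
            rw [posM_false]; unfold posH
            split_ifs <;> simp <;> omega
          · -- horizontal: p = (k, c); next (k, c-1) via c1
            rw [posM_true] at hp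
            unfold posH at hp
            rw [if_neg he, if_neg (by omega)] at hp
            try dsimp only at hp
            obtain ⟨rfl, rfl⟩ : k = pi ∧ 2 * k - m = pj := Prod.mk.injEq .. ▸ hp
            simp only [if_true]
            -- c0 (right) filled: (k, c+1)
            have hidxd : idxH k (2 * k - m + 1) < k * k + m + 1 := by
              by_cases hd : 2 * k - m + 1 < k
              · rw [idxH_row hd, if_neg he]; omega
              · rw [show 2 * k - m + 1 = k by omega, idxH_col (le_refl k), if_neg he]; omega
            rw [scCur_filled (a := k) (b := 2 * k - m + 1) (d := 0) (by rw [nb0]; push_cast; rfl) hkN (by omega)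
              (by rw [idxM_true]; omega)]
            -- c1 (left) hit: (k, c-1), idxH k (c-1) = k*k + 2k - (c-1)
            rw [scCur_hit (a := k) (b := 2 * k - m - 1)
              (d := 1) (by rw [nb1]; rw [show ((2 * k - m : Nat) : Int) - 1 = ((2 * k - m - 1 : Nat) : Int) by omega])
              hkN (by omega)
              (by rw [idxM_true, idxH_row (by omega), if_neg he]; omega) (by omega)]
            rw [selH_c1 _ (pairNe k (2 * k - m - 1))]
            rw [posM_true]; unfold posH
            split_ifs <;> simp <;> omega

lemma posM_idx (h : Bool) (k m : Nat) (hm : m ≤ 2 * k) :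
    idxM h (posM h k m).1 (posM h k m).2 = k * k + m ∧
      max (posM h k m).1 (posM h k m).2 = k := by
  cases h
  · rw [posM_false]
    dsimp only
    rw [idxM_false, Nat.max_comm]
    exact posH_idx k m hm
  · rw [posM_true, idxM_true]
    exact posH_idx k m hm

lemma castNN (N : Nat) : ((N : Int) * N) = ((N * N : Nat) : Int) := by push_cast; ring

lemma loopMain (h : Bool) (N : Nat) :
    ∀ (F k m : Nat) (cur nxt : List (Int × Int)),
      m ≤ 2 * k → k * k + m ≤ N * N → N * N - (k * k + m) ≤ F →
      (k * k + m < N * N →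
        getNextPosWithAvailList cur nxt (if h then 0 else 2) =
          (↑(posM h k m).1, ↑(posM h k m).2)) →
      pvLoopA ↑N (if h then 0 else 2) (gridFn N (pfun h (k * k + m))) (↑(k * k + m) + 1) cur nxt =
        gridFn N (pfun h (N * N)) := by
  intro F
  induction F with
  | zero =>
    intro k m cur nxt hm hle hF hsel
    have htop : k * k + m = N * N := by omega
    rw [pvLoopA, dif_neg (by rw [castNN]; omega), htop]
  | succ F ih =>
    intro k m cur nxt hm hle hF hsel
    by_cases htop : k * k + m = N * N
    · rw [pvLoopA, dif_neg (by rw [castNN]; omega), htop]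
    · have htlt : k * k + m < N * N := by omega
      specialize hsel htlt
      obtain ⟨hidx, hmax⟩ := posM_idx h k m hm
      have hkN : k < N := pv_lt_of_sq_lt (by omega)
      have hpi : (posM h k m).1 < N := by omega
      have hpj : (posM h k m).2 < N := by omega
      rw [pvLoopA, dif_pos (by rw [castNN]; exact_mod_cast by omega)]
      simp only [hsel]
      rw [gridFn_write N h (k * k + m) _ _ hpi hpj hidx]
      rw [foldEval]
      by_cases hm2 : m = 2 * k
      · -- move to layer k+1
        have hkm' : (k + 1) * (k + 1) + 0 = k * k + m + 1 := by
          have : (k + 1) * (k + 1) = k * k + 2 * k + 1 := by ring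
          omega
        have hgoal := ih (k + 1) 0 _ _ (by omega) (by omega) (by omega)
          (fun hlt => by
            rw [hkm'] at hlt
            have hstep := stepSel h N k m (posM h k m).1 (posM h k m).2 hm hlt rfl
            rw [if_pos hm2, if_pos hm2] at hstep
            exact hstep)
        rw [hkm'] at hgoal
        convert hgoal using 3
      · -- stay in layer k
        have hkm' : k * k + (m + 1) = k * k + m + 1 := by omega
        have hgoal := ih k (m + 1) _ _ (by omega) (by omega) (by omega)
          (fun hlt => by
            rw [hkm'] at hlt
            have hstep := stepSel h N k m (posM h k m).1 (posM h k m).2 hm hlt rfl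
            rw [if_neg hm2, if_neg hm2] at hstep
            exact hstep)
        rw [hkm'] at hgoal
        convert hgoal using 3

-- the initial empty grid of A
lemma init_gridA (h : Bool) (N : Nat) :
    (PySem.List.pyRange 0 (N : Int) 1).map
        (fun _ => (PySem.List.pyRange 0 (N : Int) 1).map (fun _ => (0 : Int))) =
      gridFn N (pfun h 0) := by
  rw [PySem.List.pyRange_zero_natCast]
  unfold gridFn
  rw [List.map_map]
  apply List.map_congr_left
  intro a _
  simp only [Function.comp_apply]
  rw [List.map_map]
  apply List.map_congr_left
  intro b _
  simp [pfun]

lemma solutionA_eq (n : Int) (horizontal : Bool) (hn : 0 ≤ n) :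
    solution n horizontal = gridFn n.toNat (pfun horizontal (n.toNat * n.toNat)) := by
  obtain ⟨N, rfl⟩ : ∃ N : Nat, n = ↑N := ⟨n.toNat, by omega⟩
  simp only [Int.toNat_natCast]
  unfold solution
  rw [init_gridA horizontal N]
  have := loopMain horizontal N (N * N) 0 0
    (PySem.List.pySetD pvInit4 (if horizontal then 0 else 2) (0, 0)) pvInit4
    (by omega) (by omega) (by omega)
    (fun _ => by cases horizontal <;> decide)
  simpa using this

lemma layerCells_eq (k : Nat) : pvLayerCells k = (List.range (2 * k + 1)).map (posH k) := by
  unfold pvLayerCells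
  simp only []
  apply List.ext_getElem
  · by_cases he : k % 2 = 0 <;> simp [he] <;> omega
  · intro i h1 h2
    simp only [List.length_map, List.length_range] at h2
    simp only [List.getElem_map, List.getElem_range]
    split_ifs with he
    · rw [List.getElem_reverse]
      simp only [List.length_append, List.length_map, List.length_range, List.length_reverse]
      by_cases hc : i < k
      · -- lands in the reversed row part
        rw [List.getElem_append_right (by simp; omega)]
        simp only [List.length_map, List.length_range, List.getElem_map, List.getElem_reverse,
          List.getElem_range]
        unfold posH
        rw [if_pos he, if_pos hc]
        rw [Prod.mk.injEq]
        exact ⟨rfl, by omega⟩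
      · -- lands in the column part
        rw [List.getElem_append_left (by simp; omega)]
        simp only [List.getElem_map, List.getElem_range]
        unfold posH
        rw [if_pos he, if_neg hc]
        rw [Prod.mk.injEq]
        exact ⟨by omega, rfl⟩
    · by_cases hc : i < k + 1
      · rw [List.getElem_append_left (by simp; omega)]
        simp only [List.getElem_map, List.getElem_range]
        unfold posH
        rw [if_neg he, if_pos (by omega : i ≤ k)]
      · rw [List.getElem_append_right (by simp; omega)]
        simp only [List.length_map, List.length_range, List.getElem_map, List.getElem_reverse,
          List.getElem_range]
        unfold posH
        rw [if_neg he, if_neg (by omega : ¬ i ≤ k)]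
        rw [Prod.mk.injEq]
        exact ⟨rfl, by omega⟩

lemma grid2set_natCast (g : List (List Int)) (i j : Nat) (v : Int) :
    g.set i ((g.getD i []).set j v) = pvGrid2Set g ↑i ↑j v := by
  simp [pvGrid2Set, PySem.List.pySetD_natCast, PySem.List.pyGetD_natCast]

lemma assign_step (h : Bool) (N k m : Nat) (hm : m ≤ 2 * k) (hkN : k < N) :
    pvAssign h (gridFn N (pfun h (k * k + m)), ((k * k + m : Nat) : Int) + 1) (posH k m) =
      (gridFn N (pfun h (k * k + m + 1)), ((k * k + m : Nat) : Int) + 1 + 1) := by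
  obtain ⟨hidx, hmax⟩ := posM_idx h k m hm
  have hpi : (posM h k m).1 < N := by omega
  have hpj : (posM h k m).2 < N := by omega
  unfold pvAssign
  simp only []
  have hcell : (if h then posH k m else ((posH k m).2, (posH k m).1)) = posM h k m := by
    cases h <;> rfl
  rw [hcell, grid2set_natCast, gridFn_write N h (k * k + m) _ _ hpi hpj hidx]

lemma layerFold (h : Bool) (N k : Nat) (hkN : k < N) :
    ∀ j, j ≤ 2 * k + 1 →
      ((List.range j).map (posH k)).foldl (pvAssign h)
          (gridFn N (pfun h (k * k)), ((k * k : Nat) : Int) + 1) =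
        (gridFn N (pfun h (k * k + j)), ((k * k + j : Nat) : Int) + 1) := by
  intro j
  induction j with
  | zero => intro _; norm_num
  | succ j ih =>
    intro hj
    rw [List.range_succ, List.map_append, List.foldl_append, ih (by omega)]
    simp only [List.map_cons, List.map_nil, List.foldl_cons, List.foldl_nil]
    rw [assign_step h N k j (by omega) hkN]
    have e1 : k * k + j + 1 = k * k + (j + 1) := by omega
    rw [e1]
    congr 1

lemma outerFold (h : Bool) (N : Nat) :
    ∀ K, K ≤ N →
      (List.range K).foldl (fun st k => (pvLayerCells k).foldl (pvAssign h) st)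
          (gridFn N (pfun h 0), ((0 : Nat) : Int) + 1) =
        (gridFn N (pfun h (K * K)), ((K * K : Nat) : Int) + 1) := by
  intro K
  induction K with
  | zero => intro _; norm_num
  | succ K ih =>
    intro hK
    rw [List.range_succ, List.foldl_append, ih (by omega)]
    simp only [List.foldl_cons, List.foldl_nil]
    rw [layerCells_eq]
    rw [layerFold h N K (by omega) (2 * K + 1) (le_refl _)]
    have e1 : K * K + (2 * K + 1) = (K + 1) * (K + 1) := by ring
    rw [e1]

lemma replicate_grid (h : Bool) (N : Nat) :
    List.replicate N (List.replicate N (0 : Int)) = gridFn N (pfun h 0) := by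
  unfold gridFn
  apply List.ext_getElem
  · simp
  · intro i h1 h2
    simp only [List.getElem_replicate, List.getElem_map, List.getElem_range]
    apply List.ext_getElem
    · simp
    · intro j h3 h4
      simp [pfun]

lemma solutionB_eq (n : Int) (horizontal : Bool) :
    solution_alt n horizontal = gridFn n.toNat (pfun horizontal (n.toNat * n.toNat)) := by
  unfold solution_alt
  simp only []
  rw [replicate_grid horizontal n.toNat]
  rw [show (1 : Int) = ((0 : Nat) : Int) + 1 by norm_num]
  rw [outerFold horizontal n.toNat n.toNat (le_refl _)]

-- ===== VERDICT =====
theorem solution_spec : Claim_equal_solution := by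
  intro n horizontal _ hpre
  unfold Spec_solution
  rw [solutionA_eq n horizontal hpre, solutionB_eq n horizontal]
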